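-- pv_equiv track=rewrite | github.com/uci-dsp-lab/dns_forum | multilabel_classification.py | tag7HTTPstatusCode
-- ===== SOURCE A (Python) =====
-- def tag7HTTPstatusCode(content_dict):
--     info_response = {str(_): 1 for _ in range(100, 104)}
--
--     success_response = {str(_): 1 for _ in range(200, 209)}
--     success_response.update({"226" : 1})
--
--     redir_message = {str(_): 1 for _ in range(300, 309)}
--
--     client_error = {str(_): 1 for _ in range(400, 432)}
--     not_used = ["419", "420", "427", "430"]
--     for code in not_used:
--         del client_error[code]
--     client_error["451"] = 1
--
--     servre_error = {str(_): 1 for _ in range(500, 512)}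
--
--     result = []
--     for key in content_dict:
--         if key in info_response or key in success_response or key in redir_message or key in client_error or\
--             key in servre_error:
--             result.append(key)
--     return result
-- ===== SOURCE B (Python) =====
-- def tag7HTTPstatusCode(content_dict):
--     # Parse each key and test the valid HTTP status ranges arithmetically,
--     # instead of building lookup dicts of code strings.
--     result = []
--     for key in content_dict:
--         try:
--             n = int(key)
--         except (ValueError, TypeError):
--             continue
--         if str(n) != key:
--             continue
--         if (100 <= n <= 103 or 200 <= n <= 208 or n == 226
--                 or 300 <= n <= 308
--                 or (400 <= n <= 431 and n not in (419, 420, 427, 430))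
--                 or n == 451 or 500 <= n <= 511):
--             result.append(key)
--     return result
-- ===== Notes on version B (the rewrite author's own statement) =====
-- stated objective: simpler
-- what changed: B drops the construction of five lookup dicts of code strings and instead parses each key with int() (skipping on failure), requires str(n) == key to keep only canonical decimal strings, and tests the valid HTTP status ranges arithmetically.
import Mathlib
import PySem

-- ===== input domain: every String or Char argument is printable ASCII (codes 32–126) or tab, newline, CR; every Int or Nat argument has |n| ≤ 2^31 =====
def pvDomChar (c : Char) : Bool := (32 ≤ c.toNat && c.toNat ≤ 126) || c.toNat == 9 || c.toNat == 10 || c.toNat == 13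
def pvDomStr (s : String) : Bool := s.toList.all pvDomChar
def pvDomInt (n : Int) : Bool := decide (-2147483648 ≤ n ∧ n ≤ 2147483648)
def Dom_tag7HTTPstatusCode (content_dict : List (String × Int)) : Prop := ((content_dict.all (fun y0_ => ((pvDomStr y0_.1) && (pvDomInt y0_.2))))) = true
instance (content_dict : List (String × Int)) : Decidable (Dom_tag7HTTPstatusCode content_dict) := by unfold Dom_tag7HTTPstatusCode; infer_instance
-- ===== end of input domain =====

-- B replaces A's five lookup dicts of code strings by parsing each key with int()
-- (str(n) == key keeps only canonical decimal keys) and testing the valid HTTP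
-- status ranges arithmetically; objective: simpler, same return value.

-- ===== PORT A =====
-- helper for A's dict comprehensions {str(_): 1 for _ in range(a, b)}
def pvStrDictOfRange (a b : Int) : PySem.Dict String Int :=
  (PySem.List.pyRange a b 1).foldl (fun d n => d.insert (PySem.Int.toStr n) 1) (PySem.Dict.mk [])

def tag7HTTPstatusCode (content_dict : List (String × Int)) : List String :=
  let info_response := pvStrDictOfRange 100 104
  let success_response := (pvStrDictOfRange 200 209).insert "226" 1
  let redir_message := pvStrDictOfRange 300 309
  let client_error :=
    ((["419", "420", "427", "430"].foldl (fun d code => d.erase code)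
      (pvStrDictOfRange 400 432)).insert "451" 1)
  let servre_error := pvStrDictOfRange 500 512
  (PySem.Dict.ofList content_dict).keys.foldl
    (fun result key =>
      if info_response.contains key || success_response.contains key ||
          redir_message.contains key || client_error.contains key ||
          servre_error.contains key
      then result ++ [key] else result) []

-- ===== PORT B =====
def pvOkStatus (n : Int) : Bool :=
  (100 ≤ n && n ≤ 103) || (200 ≤ n && n ≤ 208) || n == 226 ||
  (300 ≤ n && n ≤ 308) ||
  ((400 ≤ n && n ≤ 431) && !(n == 419 || n == 420 || n == 427 || n == 430)) ||
  n == 451 || (500 ≤ n && n ≤ 511)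

def tag7HTTPstatusCode_alt (content_dict : List (String × Int)) : List String :=
  (PySem.Dict.ofList content_dict).keys.foldl
    (fun result key =>
      match PySem.Int.ofStr? key with
      | none => result
      | some n => if PySem.Int.toStr n == key && pvOkStatus n then result ++ [key] else result) []

-- ===== PRECONDITION & SPEC =====
def Spec_tag7HTTPstatusCode (content_dict : List (String × Int)) (out : List String) : Prop := out = tag7HTTPstatusCode_alt content_dict
instance (content_dict : List (String × Int)) (out : List String) : Decidable (Spec_tag7HTTPstatusCode content_dict out) := by unfold Spec_tag7HTTPstatusCode; infer_instance

-- ===== CLAIM (what is proved, stated in full; the proofs are below) =====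
def Claim_equal_tag7HTTPstatusCode : Prop := ∀ (content_dict : List (String × Int)), Dom_tag7HTTPstatusCode content_dict → Spec_tag7HTTPstatusCode content_dict (tag7HTTPstatusCode content_dict)

-- ===== LEMMAS AND PROOFS =====

-- A's per-key condition and B's per-key condition, named for the proof
def pvCondA (key : String) : Bool :=
  (pvStrDictOfRange 100 104).contains key ||
  ((pvStrDictOfRange 200 209).insert "226" 1).contains key ||
  (pvStrDictOfRange 300 309).contains key ||
  ((["419", "420", "427", "430"].foldl (fun d code => d.erase code)
      (pvStrDictOfRange 400 432)).insert "451" 1).contains key ||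
  (pvStrDictOfRange 500 512).contains key

def pvCondB (key : String) : Bool :=
  match PySem.Int.ofStr? key with
  | none => false
  | some n => PySem.Int.toStr n == key && pvOkStatus n

def pvIntCodes : List Int :=
  [100, 101, 102, 103, 200, 201, 202, 203, 204, 205, 206, 207, 208, 226,
   300, 301, 302, 303, 304, 305, 306, 307, 308,
   400, 401, 402, 403, 404, 405, 406, 407, 408, 409, 410, 411, 412, 413, 414,
   415, 416, 417, 418, 421, 422, 423, 424, 425, 426, 428, 429, 431, 451,
   500, 501, 502, 503, 504, 505, 506, 507, 508, 509, 510, 511]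

def pvCodeStrs : List String := pvIntCodes.map PySem.Int.toStr

set_option maxRecDepth 8192 in
lemma pvCondA_iff (s : String) : pvCondA s = true ↔ s ∈ pvCodeStrs := by
  have h : pvCondA s = pvCodeStrs.any (fun x => x == s) := by
    have e1 : pvStrDictOfRange 100 104 =
        PySem.Dict.mk [("100",1),("101",1),("102",1),("103",1)] := by decide
    have e2 : (pvStrDictOfRange 200 209).insert "226" 1 =
        PySem.Dict.mk [("200",1),("201",1),("202",1),("203",1),("204",1),("205",1),
          ("206",1),("207",1),("208",1),("226",1)] := by decide
    have e3 : pvStrDictOfRange 300 309 =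
        PySem.Dict.mk [("300",1),("301",1),("302",1),("303",1),("304",1),("305",1),
          ("306",1),("307",1),("308",1)] := by decide
    have e4 : (["419", "420", "427", "430"].foldl (fun d code => d.erase code)
        (pvStrDictOfRange 400 432)).insert "451" 1 =
        PySem.Dict.mk [("400",1),("401",1),("402",1),("403",1),("404",1),("405",1),
          ("406",1),("407",1),("408",1),("409",1),("410",1),("411",1),("412",1),
          ("413",1),("414",1),("415",1),("416",1),("417",1),("418",1),("421",1),
          ("422",1),("423",1),("424",1),("425",1),("426",1),("428",1),("429",1),
          ("431",1),("451",1)] := by decide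
    have e5 : pvStrDictOfRange 500 512 =
        PySem.Dict.mk [("500",1),("501",1),("502",1),("503",1),("504",1),("505",1),
          ("506",1),("507",1),("508",1),("509",1),("510",1),("511",1)] := by decide
    have ec : pvCodeStrs = ["100","101","102","103","200","201","202","203","204",
      "205","206","207","208","226","300","301","302","303","304","305","306","307",
      "308","400","401","402","403","404","405","406","407","408","409","410","411",
      "412","413","414","415","416","417","418","421","422","423","424","425","426",
      "428","429","431","451","500","501","502","503","504","505","506","507","508",
      "509","510","511"] := by decide
    rw [pvCondA, e1, e2, e3, e4, e5, ec]
    simp only [PySem.Dict.contains_mk, List.any_cons, List.any_nil,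
      Bool.or_false, Bool.or_assoc]
  rw [h]
  simp only [List.any_eq_true, beq_iff_eq]
  constructor
  · rintro ⟨x, hx, rfl⟩; exact hx
  · intro hs; exact ⟨s, hs, rfl⟩

lemma pvOkStatus_iff (n : Int) : pvOkStatus n = true ↔ n ∈ pvIntCodes := by
  simp only [pvOkStatus, pvIntCodes, Bool.or_eq_true, Bool.and_eq_true, Bool.not_eq_true',
    Bool.or_eq_false_iff, beq_iff_eq, beq_eq_false_iff_ne, decide_eq_true_eq, List.mem_cons,
    List.not_mem_nil, or_false]
  omega

lemma pvCondB_of_mem (s : String) (h : s ∈ pvCodeStrs) : pvCondB s = true := by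
  have hall : pvCodeStrs.all pvCondB = true := by decide
  exact List.all_eq_true.mp hall s h

lemma pvCond_eq (s : String) : pvCondA s = pvCondB s := by
  cases hB : pvCondB s with
  | true => -- B accepts: some n parsed, toStr n = s, pvOkStatus n, hence s ∈ pvCodeStrs
    have hmem : s ∈ pvCodeStrs := by
      unfold pvCondB at hB
      cases hn : PySem.Int.ofStr? s with
      | none => rw [hn] at hB; exact absurd hB (by simp)
      | some n =>
        rw [hn] at hB
        simp only [Bool.and_eq_true, beq_iff_eq] at hB
        obtain ⟨hs, hok⟩ := hB
        rw [← hs]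
        exact List.mem_map_of_mem ((pvOkStatus_iff n).mp hok)
    exact (pvCondA_iff s).mpr hmem
  | false =>
    cases hA : pvCondA s with
    | false => rfl
    | true =>
      exact absurd (pvCondB_of_mem s ((pvCondA_iff s).mp hA)) (by simp [hB])

lemma pvStep_eq :
    (fun (result : List String) (key : String) =>
      if pvCondA key then result ++ [key] else result) =
    (fun (result : List String) (key : String) =>
      match PySem.Int.ofStr? key with
      | none => result
      | some n => if PySem.Int.toStr n == key && pvOkStatus n then result ++ [key] else result) := by
  funext result key
  rw [pvCond_eq]
  unfold pvCondB
  cases PySem.Int.ofStr? key with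
  | none => simp
  | some n => rfl

-- ===== VERDICT (by name: the statement is the Claim_ definition above) =====
theorem tag7HTTPstatusCode_spec : Claim_equal_tag7HTTPstatusCode := by
  intro content_dict _
  show List.foldl
      (fun (result : List String) (key : String) =>
        if pvCondA key then result ++ [key] else result)
      [] (PySem.Dict.ofList content_dict).keys =
    List.foldl
      (fun (result : List String) (key : String) =>
        match PySem.Int.ofStr? key with
        | none => result
        | some n => if PySem.Int.toStr n == key && pvOkStatus n then result ++ [key] else result)
      [] (PySem.Dict.ofList content_dict).keys
  rw [pvStep_eq]
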